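-- pv_equiv track=rewrite | github.com/hvijaycse/HackerRank | July Cook Off/OR-thodox.py | Check
-- ===== SOURCE A (Python) =====
-- def Check( Array):
--     Array.sort()
--     Temp = []
--     length = len(Array)
--     for Index in range( length ):
--         OR = 0
--         for value in Array[ Index: ]:
--             OR = OR | value
--             if OR in Temp:
--                 return False
--             Temp.append( OR)
--     return True
-- ===== SOURCE B (Python) =====
-- def Check(Array):
--     Array.sort()
--     n = len(Array)
--     allOR = set()
--     prev = set()
--     for v in Array:
--         cur = {v}
--         for x in prev:
--             cur.add(x | v)
--         allOR |= cur
--         prev = cur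
--     return len(allOR) == n * (n + 1) // 2
-- ===== Notes on version B (the rewrite author's own statement) =====
-- stated objective: alternative
-- what changed: Replaced the quadratic left-endpoint scan with incremental list-membership checks by a single forward pass maintaining the OR-frontier set of subarray ORs ending at the current position, returning whether the count of distinct subarray ORs equals n(n+1)/2.
import Mathlib
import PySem

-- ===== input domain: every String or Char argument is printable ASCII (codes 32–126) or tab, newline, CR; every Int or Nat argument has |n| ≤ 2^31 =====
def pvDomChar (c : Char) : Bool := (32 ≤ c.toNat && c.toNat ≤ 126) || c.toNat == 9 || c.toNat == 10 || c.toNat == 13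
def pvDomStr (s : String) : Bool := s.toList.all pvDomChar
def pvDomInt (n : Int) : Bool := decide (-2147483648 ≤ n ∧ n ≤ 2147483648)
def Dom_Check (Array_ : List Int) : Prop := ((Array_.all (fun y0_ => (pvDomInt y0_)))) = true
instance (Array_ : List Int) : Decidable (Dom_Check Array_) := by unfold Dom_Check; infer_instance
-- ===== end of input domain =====

-- B replaces A's quadratic left-endpoint scan with one forward pass keeping the OR-frontier set and
-- comparing the count of distinct subarray ORs with n(n+1)/2 (objective: alternative algorithm).
-- Both A and B sort the argument in place in Python; the equivalence proved is about the return value.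

-- ===== PORT A =====
-- inner loop: 'for value in Array[Index:]: OR |= value; if OR in Temp: return False; Temp.append(OR)'
def checkInner : List Int → Int → List Int → Option (List Int)
  | [], _, Temp => some Temp
  | value :: rest, OR, Temp =>
    let OR' := PySem.Int.bor OR value
    if OR' ∈ Temp then none
    else checkInner rest OR' (Temp ++ [OR'])

-- outer loop: 'for Index in range(length)', early return False when the inner loop hits a duplicate
def checkOuter (s : List Int) : List Int → List Int → Bool
  | [], _ => true
  | i :: idxs, Temp =>
    match checkInner (PySem.List.slice s (some i) none) 0 Temp with
    | none => false
    | some T' => checkOuter s idxs T'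

def Check (Array_ : List Int) : Bool :=
  let Array := PySem.List.sorted Array_ (fun x => x) false
  checkOuter Array (PySem.List.pyRange 0 (PySem.List.len Array) 1) []

-- ===== PORT B =====
-- one step of B's loop body: cur = {v} ∪ {x|v for x in prev}; allOR |= cur; prev = cur
def frontStep (st : PySem.Set Int × PySem.Set Int) (v : Int) : PySem.Set Int × PySem.Set Int :=
  let cur := st.1.foldl (fun c x => PySem.Set.add c (PySem.Int.bor x v)) (PySem.Set.ofList [v])
  (cur, PySem.Set.union st.2 cur)

def Check_alt (Array_ : List Int) : Bool :=
  let s := PySem.List.sorted Array_ (fun x => x) false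
  let n : Int := PySem.List.len s
  let st := s.foldl frontStep (PySem.Set.empty, PySem.Set.empty)
  decide (PySem.Set.len st.2 = PySem.Int.floordiv (n * (n + 1)) 2)

-- ===== PRECONDITION & SPEC =====
def Spec_Check (Array_ : List Int) (out : Bool) : Prop := out = Check_alt Array_
instance (Array_ : List Int) (out : Bool) : Decidable (Spec_Check Array_ out) := by unfold Spec_Check; infer_instance

-- ===== CLAIM (what is proved, stated in full; the proofs are below) =====
def Claim_equal_Check : Prop := ∀ (Array_ : List Int), Dom_Check Array_ → Spec_Check Array_ (Check Array_)

-- ===== LEMMAS AND PROOFS =====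

-- OR of a segment, accumulated left to right (as both loops do)
def orFold (acc : Int) (l : List Int) : Int := l.foldl PySem.Int.bor acc

-- ORs of the nonempty prefixes of l, starting from acc (A's inner loop values)
def pfxOrs : Int → List Int → List Int
  | _, [] => []
  | acc, v :: t => (PySem.Int.bor acc v) :: pfxOrs (PySem.Int.bor acc v) t

-- ORs of the nonempty suffixes of l (B's frontier: subarrays ending at l's last position)
def sufOrs : List Int → List Int
  | [] => []
  | v :: t => orFold 0 (v :: t) :: sufOrs t

-- ORs of all nonempty contiguous subarrays, in A's traversal order
def tailsOrs : List Int → List Int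
  | [] => []
  | v :: t => pfxOrs 0 (v :: t) ++ tailsOrs t

theorem zero_bor (v : Int) : PySem.Int.bor 0 v = v := by
  rw [PySem.Int.bor_comm]; exact PySem.Int.bor_zero v

theorem pfxOrs_append (l : List Int) : ∀ (acc v : Int),
    pfxOrs acc (l ++ [v]) = pfxOrs acc l ++ [PySem.Int.bor (orFold acc l) v] := by
  induction l with
  | nil => intro acc v; simp [pfxOrs, orFold]
  | cons a t ih => intro acc v; simp [pfxOrs, orFold, ih]


theorem sufOrs_append (l : List Int) (v : Int) :
    sufOrs (l ++ [v]) = (sufOrs l).map (fun y => PySem.Int.bor y v) ++ [v] := by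
  induction l with
  | nil => simp [sufOrs, orFold, zero_bor]
  | cons a t ih =>
    simp only [List.cons_append, sufOrs, ih, orFold, List.foldl_cons, List.foldl_append,
      List.foldl_nil, List.map_cons, List.cons_append]


theorem mem_tailsOrs_append (l : List Int) (v x : Int) :
    x ∈ tailsOrs (l ++ [v]) ↔ x ∈ tailsOrs l ∨ x ∈ sufOrs (l ++ [v]) := by
  induction l with
  | nil => simp [tailsOrs, pfxOrs, sufOrs, orFold]
  | cons a t ih =>
    have h1 : pfxOrs 0 ((a :: t) ++ [v]) = pfxOrs 0 (a :: t) ++ [PySem.Int.bor (orFold 0 (a :: t)) v] :=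
      pfxOrs_append (a :: t) 0 v
    have h2 : sufOrs ((a :: t) ++ [v]) = orFold 0 (a :: (t ++ [v])) :: sufOrs (t ++ [v]) := rfl
    have h3 : orFold 0 (a :: (t ++ [v])) = PySem.Int.bor (orFold 0 (a :: t)) v := by
      simp [orFold, List.foldl_append]
    have h4 : tailsOrs ((a :: t) ++ [v]) = pfxOrs 0 ((a :: t) ++ [v]) ++ tailsOrs (t ++ [v]) := rfl
    rw [h4, h1, h2, h3]
    have h5 : tailsOrs (a :: t) = pfxOrs 0 (a :: t) ++ tailsOrs t := rfl
    rw [h5]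
    simp only [List.mem_append, List.mem_cons, ih]
    have h6 : (x ∈ sufOrs (t ++ [v])) ↔ (x ∈ sufOrs (t ++ [v])) := Iff.rfl
    tauto


theorem checkInner_eq (l : List Int) : ∀ (OR : Int) (Temp : List Int), Temp.Nodup →
    checkInner l OR Temp =
      if (Temp ++ pfxOrs OR l).Nodup then some (Temp ++ pfxOrs OR l) else none := by
  induction l with
  | nil => intro OR Temp hT; simp [checkInner, pfxOrs, hT]
  | cons v rest ih =>
    intro OR Temp hT
    simp only [checkInner, pfxOrs]
    by_cases h : PySem.Int.bor OR v ∈ Temp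
    · have hnd : ¬ (Temp ++ (PySem.Int.bor OR v) :: pfxOrs (PySem.Int.bor OR v) rest).Nodup := by
        intro hc
        exact List.disjoint_of_nodup_append hc h List.mem_cons_self
      simp [h, hnd]
    · have hdisj : Temp.Disjoint [PySem.Int.bor OR v] := by
        intro a ha hb
        simp only [List.mem_singleton] at hb
        subst hb; exact h ha
      have hT' : (Temp ++ [PySem.Int.bor OR v]).Nodup := List.Nodup.append hT (by simp) hdisj
      rw [if_neg h, ih _ _ hT']
      simp [List.append_assoc]


theorem checkOuter_eq (s : List Int) : ∀ (k i : Nat) (Temp : List Int),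
    s.length = i + k → Temp.Nodup →
    checkOuter s (PySem.List.pyRange (i : Int) ((s.length : Int)) 1) Temp
      = decide ((Temp ++ tailsOrs (s.drop i)).Nodup) := by
  intro k
  induction k with
  | zero =>
    intro i Temp hlen hT
    have : ((s.length : Int)) ≤ (i : Int) := by omega
    rw [PySem.List.pyRange_one_eq_nil this]
    have hd : s.drop i = [] := List.drop_eq_nil_of_le (by omega)
    simp [checkOuter, hd, tailsOrs, hT]
  | succ k ih =>
    intro i Temp hlen hT
    have hi : i < s.length := by omega
    have hlt : ((i : Int)) < ((s.length : Int)) := by omega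
    rw [PySem.List.pyRange_one_cons hlt]
    have hsl : PySem.List.slice s (some (i : Int)) none = s.drop i :=
      PySem.List.slice_from_natCast s i
    have hdc : s.drop i = s[i] :: s.drop (i + 1) := List.drop_eq_getElem_cons hi
    simp only [checkOuter, hsl]
    rw [checkInner_eq _ _ _ hT]
    have htail : tailsOrs (s.drop i) = pfxOrs 0 (s.drop i) ++ tailsOrs (s.drop (i + 1)) := by
      rw [hdc]; rfl
    by_cases hnd : (Temp ++ pfxOrs 0 (s.drop i)).Nodup
    · rw [if_pos hnd]
      have hcast : ((i : Int)) + 1 = (((i + 1 : Nat)) : Int) := by push_cast; ring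
      show checkOuter s (PySem.List.pyRange ((i : Int) + 1) ((s.length : Int)) 1)
          (Temp ++ pfxOrs 0 (s.drop i)) = _
      rw [hcast, ih (i + 1) _ (by omega) hnd]
      rw [htail, List.append_assoc]
    · rw [if_neg hnd]
      have : ¬ (Temp ++ tailsOrs (s.drop i)).Nodup := by
        rw [htail, ← List.append_assoc]
        intro hc
        exact hnd (hc.sublist (List.sublist_append_left _ _))
      simp [this]


theorem Check_eq (xs : List Int) :
    Check xs = decide (tailsOrs (PySem.List.sorted xs (fun x => x) false)).Nodup := by
  unfold Check
  have h := checkOuter_eq (PySem.List.sorted xs (fun x => x) false)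
    (PySem.List.sorted xs (fun x => x) false).length 0 [] (by omega) List.nodup_nil
  simp only [Nat.cast_zero, List.drop_zero, List.nil_append] at h
  simpa [PySem.List.len_eq] using h


theorem nodup_foldl_add (v : Int) (l : List Int) : ∀ (s : PySem.Set Int), s.Nodup →
    (l.foldl (fun c x => PySem.Set.add c (PySem.Int.bor x v)) s).Nodup := by
  induction l with
  | nil => intro s hs; simpa using hs
  | cons a t ih =>
    intro s hs
    exact ih _ (PySem.Set.nodup_add _ _ hs)


theorem frontInv (s : List Int) : ∀ (p : List Int) (prev all : PySem.Set Int),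
    prev.Nodup → all.Nodup →
    (∀ x, x ∈ prev ↔ x ∈ sufOrs p) → (∀ x, x ∈ all ↔ x ∈ tailsOrs p) →
    ((s.foldl frontStep (prev, all)).1.Nodup ∧ (s.foldl frontStep (prev, all)).2.Nodup ∧
     (∀ x, x ∈ (s.foldl frontStep (prev, all)).1 ↔ x ∈ sufOrs (p ++ s)) ∧
     (∀ x, x ∈ (s.foldl frontStep (prev, all)).2 ↔ x ∈ tailsOrs (p ++ s))) := by
  induction s with
  | nil => intro p prev all h1 h2 h3 h4; simpa using ⟨h1, h2, h3, h4⟩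
  | cons v t ih =>
    intro p prev all h1 h2 h3 h4
    simp only [List.foldl_cons]
    have hcons : p ++ v :: t = (p ++ [v]) ++ t := by simp
    rw [hcons]
    apply ih (p ++ [v])
    · exact nodup_foldl_add v prev _ (PySem.Set.nodup_ofList _)
    · exact PySem.Set.nodup_union _ _ h2
    · intro x
      simp only [PySem.Set.mem_foldl_add, PySem.Set.mem_ofList, List.mem_singleton,
        sufOrs_append, List.mem_append, List.mem_map]
      constructor
      · rintro (rfl | ⟨b, hb, rfl⟩)
        · right; simp
        · left; exact ⟨b, (h3 b).mp hb, rfl⟩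
      · rintro (⟨y, hy, rfl⟩ | hx)
        · exact Or.inr ⟨y, (h3 y).mpr hy, rfl⟩
        · left; simpa using hx
    · intro x
      simp only [PySem.Set.mem_union, PySem.Set.mem_foldl_add, PySem.Set.mem_ofList,
        List.mem_singleton, mem_tailsOrs_append, sufOrs_append, List.mem_append, List.mem_map]
      constructor
      · rintro (hx | rfl | ⟨b, hb, rfl⟩)
        · left; exact (h4 x).mp hx
        · right; right; simp
        · right; left; exact ⟨b, (h3 b).mp hb, rfl⟩
      · rintro (hx | ⟨y, hy, rfl⟩ | hx)
        · left; exact (h4 x).mpr hx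
        · right; right; exact ⟨y, (h3 y).mpr hy, rfl⟩
        · right; left; simpa using hx


theorem length_pfxOrs (l : List Int) : ∀ (acc : Int), (pfxOrs acc l).length = l.length := by
  induction l with
  | nil => intro acc; rfl
  | cons a t ih => intro acc; simp [pfxOrs, ih]


theorem two_mul_length_tailsOrs (s : List Int) :
    2 * (tailsOrs s).length = s.length * (s.length + 1) := by
  induction s with
  | nil => rfl
  | cons v t ih =>
    have h1 : (tailsOrs (v :: t)).length = (t.length + 1) + (tailsOrs t).length := by
      simp [tailsOrs, length_pfxOrs]
    have h2 : (t.length + 1) * (t.length + 1 + 1) = t.length * (t.length + 1) + 2 * (t.length + 1) := by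
      ring
    simp only [h1, List.length_cons, h2]
    omega


-- ===== VERDICT (by name: the statement is the Claim_ definition above) =====
theorem Check_spec : Claim_equal_Check := by
  intro xs _
  unfold Spec_Check
  rw [Check_eq]
  show decide (tailsOrs (PySem.List.sorted xs (fun x => x) false)).Nodup
      = decide (PySem.Set.len
          ((PySem.List.sorted xs (fun x => x) false).foldl frontStep
            (PySem.Set.empty, PySem.Set.empty)).2
        = PySem.Int.floordiv
            (PySem.List.len (PySem.List.sorted xs (fun x => x) false) *
              (PySem.List.len (PySem.List.sorted xs (fun x => x) false) + 1)) 2)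
  set s := PySem.List.sorted xs (fun x => x) false with hs
  obtain ⟨-, h2, -, h4⟩ := frontInv s [] [] [] List.nodup_nil List.nodup_nil
    (fun x => by simp [sufOrs]) (fun x => by simp [tailsOrs])
  set T := tailsOrs s with hTdef
  set st := s.foldl frontStep (PySem.Set.empty, PySem.Set.empty) with hst
  have hperm : st.2.Perm T.dedup :=
    (List.perm_ext_iff_of_nodup h2 T.nodup_dedup).mpr (fun a => by
      rw [List.mem_dedup]; simpa using h4 a)
  have hlen2 : st.2.length = T.dedup.length := hperm.length_eq
  have hcount : 2 * T.length = s.length * (s.length + 1) := two_mul_length_tailsOrs s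
  have hfd : PySem.Int.floordiv ((s.length : Int) * ((s.length : Int) + 1)) 2 = (T.length : Int) := by
    have h1 : ((s.length : Int) * ((s.length : Int) + 1)) = ((2 * T.length : Nat) : Int) := by
      exact_mod_cast hcount.symm
    have h2' : PySem.Int.floordiv ((2 * T.length : Nat) : Int) 2 = ((2 * T.length / 2 : Nat) : Int) := by
      exact_mod_cast PySem.Int.floordiv_natCast (2 * T.length) 2
    rw [h1, h2']
    congr 1
    omega
  have hiff : T.Nodup ↔ PySem.Set.len st.2 =
      PySem.Int.floordiv ((s.length : Int) * ((s.length : Int) + 1)) 2 := by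
    rw [hfd]
    simp only [PySem.Set.len]
    rw [hlen2]
    rw [Nat.cast_inj]
    constructor
    · intro h
      rw [List.dedup_eq_self.mpr h]
    · intro h
      have := List.Sublist.eq_of_length (List.dedup_sublist T) h
      rw [← this]
      exact T.nodup_dedup
  simp only [PySem.List.len_eq]
  rw [decide_eq_decide]
  exact hiff
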